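-- pv_equiv track=rewrite | github.com/nitish-silswal/AI_Assignments | TSP/tsp.py | count_distinct_elements
-- ===== SOURCE A (Python) =====
-- def count_distinct_elements(population):
-- 	S = set()
-- 	for individual in population:
-- 		s = ""
-- 		for el in individual:
-- 			s += el
-- 		S.add(s)
-- 	return len(S)
-- ===== SOURCE B (Python) =====
-- def count_distinct_elements(population):
-- 	keys = sorted("".join(individual) for individual in population)
-- 	count = 0
-- 	prev = None
-- 	for k in keys:
-- 		if k != prev:
-- 			count += 1
-- 		prev = k
-- 	return count
-- ===== Notes on version B (the rewrite author's own statement) =====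
-- stated objective: alternative
-- what changed: Replaces the hash set of concatenated keys by sort-then-scan: all concatenated strings are sorted and a single linear pass counts run boundaries (an element is new when it differs from its predecessor).
import Mathlib
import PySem

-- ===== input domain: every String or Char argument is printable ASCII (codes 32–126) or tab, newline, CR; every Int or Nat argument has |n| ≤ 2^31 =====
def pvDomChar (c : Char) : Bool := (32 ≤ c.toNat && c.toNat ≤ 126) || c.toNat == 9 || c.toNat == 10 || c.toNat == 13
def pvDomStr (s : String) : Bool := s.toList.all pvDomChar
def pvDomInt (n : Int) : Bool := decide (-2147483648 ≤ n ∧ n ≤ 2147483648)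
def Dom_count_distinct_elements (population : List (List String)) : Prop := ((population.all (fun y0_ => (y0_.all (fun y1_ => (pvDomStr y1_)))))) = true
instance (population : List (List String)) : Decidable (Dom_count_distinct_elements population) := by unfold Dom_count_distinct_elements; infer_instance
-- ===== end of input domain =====

-- B replaces A's hash set of concatenated keys by sort-then-scan (sort all keys, one pass counting run boundaries); alternative decomposition, same result.

-- ===== PORT A =====
def count_distinct_elements (population : List (List String)) : Int :=
  let S : PySem.Set String :=
    population.foldl
      (fun S individual =>
        PySem.Set.add S (individual.foldl (fun s el => s ++ el) ""))
      PySem.Set.empty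
  PySem.Set.len S

-- ===== PORT B =====
def count_distinct_elements_alt (population : List (List String)) : Int :=
  let keys := PySem.List.sorted (population.map (fun individual => PySem.Str.join "" individual)) (fun x => x) false
  let r := keys.foldl
    (fun (st : Int × Option String) k =>
      (if some k ≠ st.2 then st.1 + 1 else st.1, some k))
    (0, none)
  r.1

-- ===== PRECONDITION & SPEC =====
def Spec_count_distinct_elements (population : List (List String)) (out : Int) : Prop := out = count_distinct_elements_alt population
instance (population : List (List String)) (out : Int) : Decidable (Spec_count_distinct_elements population out) := by unfold Spec_count_distinct_elements; infer_instance

-- ===== CLAIM (what is proved, stated in full; the proofs are below) =====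
def Claim_equal_count_distinct_elements : Prop := ∀ (population : List (List String)), Dom_count_distinct_elements population → Spec_count_distinct_elements population (count_distinct_elements population)

-- ===== LEMMAS AND PROOFS =====

-- ''.join with an empty separator is flattening
theorem join_nilsep (l : List (List Char)) : PySem.Chars.join [] l = l.flatten := by
  simp only [PySem.Chars.join, List.intercalate]
  induction l with
  | nil => rfl
  | cons a t ih =>
    cases t with
    | nil => rfl
    | cons b u => simpa [List.intersperse_cons₂] using ih

-- A's += loop over an individual computes "".join(individual)
theorem concat_loop_eq_join (individual : List String) :
    individual.foldl (fun s el => s ++ el) "" = PySem.Str.join "" individual := by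
  have key : ∀ init : String, individual.foldl (fun s el => s ++ el) init
      = String.ofList (init.toList ++ (individual.map String.toList).flatten) := by
    induction individual with
    | nil =>
      intro init
      simp [String.ofList_toList]
    | cons a t ih =>
      intro init
      rw [List.foldl_cons, ih (init ++ a)]
      congr 1
      simp
  rw [key]
  simp [PySem.Str.join, join_nilsep]

-- A's result is the number of distinct concatenated keys
theorem portA_eq (population : List (List String)) :
    count_distinct_elements population
      = ((PySem.Set.ofList (population.map (fun individual => PySem.Str.join "" individual))).length : Int) := by
  unfold count_distinct_elements
  have h : (fun (S : PySem.Set String) individual =>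
      PySem.Set.add S (individual.foldl (fun s el => s ++ el) ""))
      = (fun (S : PySem.Set String) individual => PySem.Set.add S (PySem.Str.join "" individual)) := by
    funext S individual; rw [concat_loop_eq_join]
  rw [h, ← PySem.Set.update_map_eq_foldl_add]
  rw [show (PySem.Set.empty : PySem.Set String) = [] from rfl, PySem.Set.update_nil_left]
  rfl

-- the boundary-counting scan on a sorted list: invariant on the (count, prev) state
theorem scan_count (l : List String) (c : Int) (prev : Option String)
    (hs : l.Pairwise (· ≤ ·))
    (hp : ∀ p, prev = some p → ∀ x ∈ l, p ≤ x) :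
    (l.foldl (fun (st : Int × Option String) k =>
        (if some k ≠ st.2 then st.1 + 1 else st.1, some k)) (c, prev)).1
      = c + (((PySem.Set.ofList l).filter (fun x => decide (some x ≠ prev))).length : Int) := by
  induction l generalizing c prev with
  | nil => simp
  | cons a t ih =>
    rw [List.foldl_cons]
    have hs' : t.Pairwise (· ≤ ·) := hs.of_cons
    have hat : ∀ x ∈ t, a ≤ x := fun x hx => (List.pairwise_cons.mp hs).1 x hx
    simp only []
    rw [ih (if some a ≠ (c, prev).2 then (c, prev).1 + 1 else (c, prev).1) (some a) hs'
        (by intro p hp' x hx; cases hp'; exact hat x hx)]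
    have hdisc : ((PySem.Set.ofList t).filter (fun x => decide (some x ≠ some a)))
        = PySem.Set.discard (PySem.Set.ofList t) a := by
      unfold PySem.Set.discard
      apply List.filter_congr
      intro x hx
      by_cases h : x = a <;> simp [h]
    have hkeep : ((PySem.Set.discard (PySem.Set.ofList t) a).filter (fun x => decide (some x ≠ prev)))
        = PySem.Set.discard (PySem.Set.ofList t) a := by
      apply List.filter_eq_self.mpr
      intro x hx
      have hmem := (PySem.Set.mem_discard (PySem.Set.ofList t) a x).mp hx
      have hxt : x ∈ t := (PySem.Set.mem_ofList t x).mp hmem.1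
      cases prev with
      | none => simp
      | some p =>
        have hpa : p ≤ a := hp p rfl a (List.mem_cons_self)
        have hax : a ≤ x := hat x hxt
        simp only [decide_eq_true_eq, ne_eq, Option.some.injEq]
        intro hxp
        exact hmem.2 (le_antisymm (hxp ▸ hpa) hax)
    rw [PySem.Set.ofList_cons, List.filter_cons, hdisc, hkeep]
    by_cases h : some a ≠ prev <;> simp [h] <;> ring

-- B's result is the same number of distinct concatenated keys
theorem portB_eq (population : List (List String)) :
    count_distinct_elements_alt population
      = ((PySem.Set.ofList (population.map (fun individual => PySem.Str.join "" individual))).length : Int) := by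
  unfold count_distinct_elements_alt
  set keys := population.map (fun individual => PySem.Str.join "" individual) with hkeys
  simp only []
  rw [scan_count _ 0 none (PySem.List.sorted_pairwise keys (fun x => x)) (by intro p h; cases h)]
  rw [List.filter_eq_self.mpr (by intro x _; simp)]
  have hperm : (PySem.Set.ofList (PySem.List.sorted keys (fun x => x) false)).Perm (PySem.Set.ofList keys) := by
    apply (List.perm_ext_iff_of_nodup (PySem.Set.nodup_ofList _) (PySem.Set.nodup_ofList _)).mpr
    intro x
    simp [PySem.Set.mem_ofList, PySem.List.mem_sorted]
  rw [hperm.length_eq]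
  ring

-- ===== VERDICT (by name: the statement is the Claim_ definition above) =====
theorem count_distinct_elements_spec : Claim_equal_count_distinct_elements := by
  intro population _
  unfold Spec_count_distinct_elements
  rw [portA_eq, portB_eq]
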